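-- pv_equiv track=rewrite | github.com/atlanmod/ACP | fr.imt.naomod.acp/src/utility/MoreUtility.py | dontcare
-- ===== SOURCE A (Python) =====
-- def dontcare(rels, binary):
--     res = []
--     for i in range(0, len(binary)):
--         if (i in rels):
--             res.append(-1)
--         else:
--             res.append(binary[i])
--     return res
-- ===== SOURCE B (Python) =====
-- def dontcare(rels, binary):
--     res = list(binary)
--     for i in rels:
--         if 0 <= i < len(binary):
--             res[i] = -1
--     return res
-- ===== Notes on version B (the rewrite author's own statement) =====
-- stated objective: alternative
-- what changed: B copies binary and overwrites only the masked in-range positions by iterating over rels, instead of rebuilding the list with a membership test at every index.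
import Mathlib
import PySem

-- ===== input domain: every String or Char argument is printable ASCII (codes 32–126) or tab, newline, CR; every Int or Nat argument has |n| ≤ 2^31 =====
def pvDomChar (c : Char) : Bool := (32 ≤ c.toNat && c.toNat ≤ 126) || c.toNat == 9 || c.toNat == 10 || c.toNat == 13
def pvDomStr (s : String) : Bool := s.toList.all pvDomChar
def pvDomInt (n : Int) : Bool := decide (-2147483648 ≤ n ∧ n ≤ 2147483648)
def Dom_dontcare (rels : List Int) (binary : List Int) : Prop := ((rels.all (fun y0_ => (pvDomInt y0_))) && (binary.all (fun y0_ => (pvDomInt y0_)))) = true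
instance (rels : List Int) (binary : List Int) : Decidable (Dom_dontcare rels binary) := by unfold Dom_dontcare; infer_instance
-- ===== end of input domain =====

-- B copies the list and overwrites only the in-range masked indices by iterating over rels,
-- instead of A's rebuild-with-membership-test at every index (alternative decomposition).

-- ===== PORT A =====
-- loop 'for i in range(0, len(binary))' appending -1 or binary[i]; indexing is always in range,
-- so pyGetD … 0 is exact here.
def dontcare (rels : List Int) (binary : List Int) : List Int :=
  (PySem.List.pyRange 0 (binary.length : Int) 1).foldl
    (fun res i => res ++ [if i ∈ rels then -1 else PySem.List.pyGetD binary i 0]) []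

-- ===== PORT B =====
-- res = list(binary); for i in rels: if 0 <= i < len(binary): res[i] = -1
def dontcare_alt (rels : List Int) (binary : List Int) : List Int :=
  rels.foldl
    (fun res i => if 0 ≤ i ∧ i < (binary.length : Int) then res.set i.toNat (-1) else res)
    binary

-- ===== PRECONDITION & SPEC =====
def Spec_dontcare (rels : List Int) (binary : List Int) (out : List Int) : Prop := out = dontcare_alt rels binary
instance (rels : List Int) (binary : List Int) (out : List Int) : Decidable (Spec_dontcare rels binary out) := by unfold Spec_dontcare; infer_instance

-- ===== CLAIM (what is proved, stated in full; the proofs are below) =====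
def Claim_equal_dontcare : Prop := ∀ (rels : List Int) (binary : List Int), Dom_dontcare rels binary → Spec_dontcare rels binary (dontcare rels binary)

-- ===== LEMMAS AND PROOFS =====

-- A's append-loop is a map over the range.
theorem foldl_app_singleton {α β : Type} (f : α → β) :
    ∀ (l : List α) (acc : List β),
      l.foldl (fun r i => r ++ [f i]) acc = acc ++ l.map f := by
  intro l
  induction l with
  | nil => simp
  | cons x xs ih => intro acc; simp [List.foldl, ih]

theorem dontcare_eq_map (rels binary : List Int) :
    dontcare rels binary =
      (PySem.List.pyRange 0 (binary.length : Int) 1).map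
        (fun i => if i ∈ rels then -1 else PySem.List.pyGetD binary i 0) := by
  unfold dontcare
  rw [foldl_app_singleton (fun i => if i ∈ rels then -1 else PySem.List.pyGetD binary i 0)]
  rfl

-- B's fold preserves length.
theorem alt_length (binary : List Int) :
    ∀ (rels : List Int) (acc : List Int),
      (rels.foldl
        (fun res i => if 0 ≤ i ∧ i < (binary.length : Int) then res.set i.toNat (-1) else res)
        acc).length = acc.length := by
  intro rels
  induction rels with
  | nil => intro acc; rfl
  | cons x xs ih =>
      intro acc
      simp only [List.foldl]
      rw [ih]
      split <;> simp

-- Element j of B's fold, for any accumulator of the guarded length.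
theorem alt_get (binary : List Int) :
    ∀ (rels : List Int) (acc : List Int) (_hlen : acc.length = binary.length)
      (j : Nat) (hj : j < acc.length)
      (hj' : j < (rels.foldl
        (fun res i => if 0 ≤ i ∧ i < (binary.length : Int) then res.set i.toNat (-1) else res)
        acc).length),
      (rels.foldl
        (fun res i => if 0 ≤ i ∧ i < (binary.length : Int) then res.set i.toNat (-1) else res)
        acc)[j] = if (j : Int) ∈ rels then -1 else acc[j] := by
  intro rels
  induction rels with
  | nil => intro acc hlen j hj hj'; simp
  | cons x xs ih =>
      intro acc hlen j hj hj'
      simp only [List.foldl] at hj' ⊢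
      by_cases hx : 0 ≤ x ∧ x < (binary.length : Int)
      · simp only [if_pos hx] at hj' ⊢
        have hlen' : (acc.set x.toNat (-1)).length = binary.length := by simp [hlen]
        rw [ih (acc.set x.toNat (-1)) hlen' j (by simpa using hj) hj']
        by_cases hmem : (j : Int) ∈ xs
        · simp [hmem]
        · by_cases hxj : x = (j : Int)
          · have hx2 : x.toNat = j := by omega
            simp [hmem, hxj, List.getElem_set_self]
          · have hne : x.toNat ≠ j := by omega
            have hjx : (j : Int) ≠ x := fun h => hxj h.symm
            simp [hmem, List.mem_cons, hjx, List.getElem_set_ne hne]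
      · simp only [if_neg hx] at hj' ⊢
        rw [ih acc hlen j hj hj']
        have hxj : x ≠ (j : Int) := by
          intro h; subst h
          rw [hlen] at hj
          exact hx ⟨by positivity, by exact_mod_cast hj⟩
        have hjx : (j : Int) ≠ x := fun h => hxj h.symm
        by_cases hmem : (j : Int) ∈ xs
        · simp [hmem]
        · simp [List.mem_cons, hmem, hjx]

-- ===== VERDICT (by name: the statement is the Claim_ definition above) =====
theorem dontcare_spec : Claim_equal_dontcare := by
  intro rels binary _
  unfold Spec_dontcare
  rw [dontcare_eq_map]
  apply List.ext_getElem
  · simp [dontcare_alt, alt_length]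
  · intro j h1 h2
    have hjlen : j < binary.length := by simpa [dontcare_alt, alt_length] using h2
    unfold dontcare_alt at h2 ⊢
    rw [alt_get binary rels binary rfl j hjlen h2]
    simp only [List.getElem_map, PySem.List.getElem_pyRange_one, zero_add]
    by_cases hm : (j : Int) ∈ rels
    · simp [hm]
    · simp [hm, PySem.List.pyGetD_natCast, hjlen]
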